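-- pv_equiv track=rewrite | github.com/initialencounter/code | Python/SCS/lab6_recerse_sentence.py | reverse_sentence_boolean
-- ===== SOURCE A (Python) =====
-- def reverse_sentence_boolean(s):
--     n1 = 0  # 单词的头部序号
--     new2 = ''
--     boln = True
--     s = s+'A'
--     for i in range(len(s)):
--         if s[i].isupper()==False and s[i+1].isupper():
--             for j in range(i):
--                 if s[j].isupper():
--                     boln=False
--             if boln==True:
--                 new = s[0:i+1]
--                 n1 = i+1
--                 new2 = new2 + new
--         else:
--             if s[i].isupper():
--                 new = s[n1:i]
--                 n1 = i
--                 new=new[::-1]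
--                 new2 = new2 + new
--     return new2
-- ===== SOURCE B (Python) =====
-- def reverse_sentence_boolean(s):
--     idx = [i for i, ch in enumerate(s) if ch.isupper()]
--     if not idx:
--         return s
--     parts = [s[:idx[0]]]
--     for lo, hi in zip(idx, idx[1:] + [len(s)]):
--         parts.append(s[lo:hi][::-1])
--     return ''.join(parts)
-- ===== Notes on version B (the rewrite author's own statement) =====
-- stated objective: faster
-- what changed: B collects the uppercase positions in one pass and emits the unreversed prefix plus each reversed slice between consecutive boundaries, replacing A's sentinel append, permanent boolean flag and quadratic prefix rescans at every word boundary.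
import Mathlib
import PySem

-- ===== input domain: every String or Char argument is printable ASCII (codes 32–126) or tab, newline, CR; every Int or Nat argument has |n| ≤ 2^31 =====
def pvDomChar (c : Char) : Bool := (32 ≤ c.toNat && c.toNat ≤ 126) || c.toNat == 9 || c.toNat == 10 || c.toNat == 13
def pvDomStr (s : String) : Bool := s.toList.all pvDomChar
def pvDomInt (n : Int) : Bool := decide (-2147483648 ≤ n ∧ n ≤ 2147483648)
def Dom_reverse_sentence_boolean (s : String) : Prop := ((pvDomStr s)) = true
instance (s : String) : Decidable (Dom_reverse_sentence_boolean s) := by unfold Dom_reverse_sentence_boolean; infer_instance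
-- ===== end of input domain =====

-- B collects the uppercase positions once and emits the prefix plus each reversed
-- uppercase-delimited slice, replacing A's sentinel append, boolean flag and prefix rescans.

-- ===== PORT A =====
-- loop body of A's for-loop over i (state: n1, new2, boln); Python evaluates `s[i+1]`
-- only when `s[i]` is not uppercase (short-circuit `and`), and the appended sentinel 'A'
-- is uppercase, so that access is always in range: the ' ' default of pyGetD is never seen.
def aStep (t : List Char) (st : Nat × List Char × Bool) (i : Nat) : Nat × List Char × Bool :=
  let n1 := st.1
  let new2 := st.2.1
  let boln := st.2.2
  if PySem.Chars.isupper (PySem.List.pyGetD t (i : Int) ' ') = false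
      ∧ PySem.Chars.isupper (PySem.List.pyGetD t ((i : Int) + 1) ' ') = true then
    let boln := (List.range i).foldl (fun b (j : Nat) =>
        if PySem.Chars.isupper (PySem.List.pyGetD t (j : Int) ' ') then false else b) boln
    if boln then
      (i + 1, new2 ++ PySem.List.slice t (some 0) (some ((i : Int) + 1)), boln)
    else (n1, new2, boln)
  else
    if PySem.Chars.isupper (PySem.List.pyGetD t (i : Int) ' ') then
      -- new[::-1] is List.reverse (PySem.List.slice?_none_none_neg_one)
      (i, new2 ++ (PySem.List.slice t (some (n1 : Int)) (some (i : Int))).reverse, boln)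
    else (n1, new2, boln)

def reverse_sentence_boolean (s : String) : String :=
  let t : List Char := s.toList ++ ['A']   -- s = s + 'A'
  let fin := (List.range t.length).foldl (aStep t) (0, ([] : List Char), true)
  String.ofList fin.2.1

-- ===== PORT B =====
def reverse_sentence_boolean_alt (s : String) : String :=
  let cs := s.toList
  -- [i for i, ch in enumerate(s) if ch.isupper()]
  let idx : List Int := (PySem.List.enumerate cs).filterMap
      (fun p => if PySem.Chars.isupper p.2 then some p.1 else none)
  if idx.isEmpty then s
  else
    -- parts = [s[:idx[0]]] then one reversed slice per boundary pair; ''.join = flatten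
    let parts : List (List Char) :=
      PySem.List.slice cs none (some (idx.headD 0)) ::
        (idx.zip (idx.tail ++ [(cs.length : Int)])).map
          (fun p => (PySem.List.slice cs (some p.1) (some p.2)).reverse)
    String.ofList parts.flatten

-- ===== PRECONDITION & SPEC =====
def Spec_reverse_sentence_boolean (s : String) (out : String) : Prop := out = reverse_sentence_boolean_alt s
instance (s : String) (out : String) : Decidable (Spec_reverse_sentence_boolean s out) := by unfold Spec_reverse_sentence_boolean; infer_instance

-- ===== CLAIM (what is proved, stated in full; the proofs are below) =====
def Claim_equal_reverse_sentence_boolean : Prop := ∀ (s : String), Dom_reverse_sentence_boolean s → Spec_reverse_sentence_boolean s (reverse_sentence_boolean s)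

-- ===== LEMMAS AND PROOFS =====

-- indices (offset by k) of the uppercase characters of a list
def ups : List Char → Nat → List Nat
  | [], _ => []
  | c :: cs, k => if PySem.Chars.isupper c then k :: ups cs (k + 1) else ups cs (k + 1)

-- the common output shape: prefix before the first boundary, then each segment reversed
def segs (t : List Char) (ks : List Nat) : List Char :=
  match ks with
  | [] => []
  | k0 :: _ => t.take k0 ++
      (ks.zip ks.tail).flatMap (fun p => ((t.drop p.1).take (p.2 - p.1)).reverse)

-- A's loop state after i iterations, as a function of the input
def N1 (t : List Char) (i : Nat) : Nat :=
  match (ups (t.take i) 0).getLast? with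
  | some k => k
  | none => if PySem.Chars.isupper (t.getD i ' ') then i else 0

def NEW2 (t : List Char) (i : Nat) : List Char :=
  if ups (t.take i) 0 = [] then
    (if PySem.Chars.isupper (t.getD i ' ') then t.take i else [])
  else segs t (ups (t.take i) 0)

lemma segs_cons (t : List Char) (k0 : Nat) (ks : List Nat) :
    segs t (k0 :: ks) = t.take k0 ++
      ((k0 :: ks).zip ks).flatMap (fun p => ((t.drop p.1).take (p.2 - p.1)).reverse) := rfl

lemma N1_nil (t : List Char) (i : Nat) (h : ups (t.take i) 0 = []) :
    N1 t i = if PySem.Chars.isupper (t.getD i ' ') then i else 0 := by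
  rw [N1, h]; rfl

lemma N1_last (t : List Char) (i k : Nat) (h : (ups (t.take i) 0).getLast? = some k) :
    N1 t i = k := by rw [N1, h]

lemma ups_append (l : List Char) (c : Char) (k : Nat) :
    ups (l ++ [c]) k = ups l k ++ (if PySem.Chars.isupper c then [k + l.length] else []) := by
  induction l generalizing k with
  | nil => simp [ups]
  | cons d l ih =>
    simp only [List.cons_append, ups, ih (k+1), List.length_cons]
    split_ifs <;> simp <;> omega

lemma ups_mem_lt {l : List Char} {k m : Nat} (h : m ∈ ups l k) : k ≤ m ∧ m < k + l.length := by
  induction l generalizing k with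
  | nil => simp [ups] at h
  | cons d l ih =>
    simp only [ups] at h
    split_ifs at h with hu
    · rcases List.mem_cons.mp h with rfl | h
      · simp
      · have := ih h; constructor <;> (simp at this ⊢; omega)
    · have := ih h; constructor <;> (simp at this ⊢; omega)

lemma inner_fold (t : List Char) (i : Nat) (hi : i ≤ t.length) (b0 : Bool) :
    (List.range i).foldl (fun b (j : Nat) =>
        if PySem.Chars.isupper (PySem.List.pyGetD t (j : Int) ' ') then false else b) b0
      = if ups (t.take i) 0 = [] then b0 else false := by
  induction i with
  | zero => simp [ups]
  | succ i ih =>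
    have hi' : i < t.length := by omega
    rw [List.range_succ, List.foldl_append]
    rw [ih (by omega)]
    have htake : t.take (i+1) = t.take i ++ [t[i]] := by
      rw [List.take_succ]; simp [List.getElem?_eq_getElem hi']
    rw [htake, ups_append]
    have hget : PySem.List.pyGetD t (i : Int) ' ' = t[i] := by
      rw [PySem.List.pyGetD_natCast]; simp [List.getD, List.getElem?_eq_getElem hi']
    simp only [List.foldl_cons, List.foldl_nil, hget]
    split_ifs <;> simp_all

lemma zip_take {α β : Type} (xs : List α) (ys : List β) :
    xs.zip ys = (xs.take ys.length).zip ys := by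
  induction xs generalizing ys with
  | nil => simp
  | cons x xs ih =>
    cases ys with
    | nil => simp
    | cons y ys => simp [List.zip_cons_cons, ih ys]

lemma zip_tail_append (ks : List Nat) (h : ks ≠ []) (a : Nat) :
    (ks ++ [a]).zip ((ks ++ [a]).tail) = ks.zip ks.tail ++ [(ks.getLast h, a)] := by
  induction ks with
  | nil => simp at h
  | cons x ks ih =>
    cases ks with
    | nil => simp
    | cons y ks => simpa using ih (by simp)

lemma segs_append (t : List Char) (ks : List Nat) (h : ks ≠ []) (a : Nat) :
    segs t (ks ++ [a]) = segs t ks ++ ((t.drop (ks.getLast h)).take (a - ks.getLast h)).reverse := by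
  obtain ⟨k0, rest, rfl⟩ : ∃ k0 rest, ks = k0 :: rest := by
    cases ks with | nil => simp at h | cons a b => exact ⟨a, b, rfl⟩
  have h1 : (k0 :: rest) ++ [a] = k0 :: (rest ++ [a]) := by simp
  rw [h1, segs, segs, ← h1, zip_tail_append (k0::rest) h a]
  simp [List.flatMap_append]

lemma enum_bridge (l : List Char) (k : Nat) :
    (PySem.List.enumerate l (k : Int)).filterMap
        (fun p => if PySem.Chars.isupper p.2 then some p.1 else none)
      = (ups l k).map (fun m : Nat => (m : Int)) := by
  induction l generalizing k with
  | nil => simp [PySem.List.enumerate_nil, ups]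
  | cons c l ih =>
    rw [PySem.List.enumerate_cons]
    have : (k : Int) + 1 = ((k+1 : Nat) : Int) := by push_cast; ring
    rw [List.filterMap_cons, this, ih (k+1)]
    by_cases hu : PySem.Chars.isupper c <;> simp [ups, hu]

-- the invariant of A's main loop: after i iterations the state is (N1 t i, NEW2 t i, b),
-- and the flag b is still true whenever no uppercase character has been passed yet
lemma invA (t : List Char) (i : Nat) (hi : i ≤ t.length) :
    ∃ b : Bool, (List.range i).foldl (aStep t) (0, ([] : List Char), true) = (N1 t i, NEW2 t i, b)
      ∧ (ups (t.take i) 0 = [] → b = true) := by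
  induction i with
  | zero =>
    refine ⟨true, ?_, fun _ => rfl⟩
    simp [N1, NEW2, ups]
  | succ i ih =>
    have hi' : i < t.length := by omega
    obtain ⟨b, hfold, hb⟩ := ih (by omega)
    rw [List.range_succ, List.foldl_append, hfold]
    simp only [List.foldl_cons, List.foldl_nil]
    have hlen : (t.take i).length = i := by simp [List.length_take]; omega
    have hget : PySem.List.pyGetD t (i : Int) ' ' = t[i] := by
      rw [PySem.List.pyGetD_natCast]; simp [List.getD, List.getElem?_eq_getElem hi']
    have hgetD : t.getD i ' ' = t[i] := by simp [List.getD, List.getElem?_eq_getElem hi']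
    have hcast : (i : Int) + 1 = ((i + 1 : Nat) : Int) := by push_cast; ring
    have hget1 : PySem.List.pyGetD t ((i : Int) + 1) ' ' = t.getD (i+1) ' ' := by
      rw [hcast, PySem.List.pyGetD_natCast]
    have htake : t.take (i+1) = t.take i ++ [t[i]] := by
      rw [List.take_succ]; simp [List.getElem?_eq_getElem hi']
    have hU1 : ups (t.take (i+1)) 0 =
        ups (t.take i) 0 ++ (if PySem.Chars.isupper t[i] then [i] else []) := by
      rw [htake, ups_append, hlen]; simp
    rw [aStep]
    simp only [hget, hget1]
    by_cases h1 : PySem.Chars.isupper t[i] = false ∧ PySem.Chars.isupper (t.getD (i+1) ' ') = true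
    · rw [if_pos h1]
      rw [inner_fold t i (by omega) b]
      by_cases hU : ups (t.take i) 0 = []
      · rw [if_pos hU, hb hU, if_pos rfl]
        refine ⟨true, ?_, fun _ => rfl⟩
        have hU' : ups (t.take (i+1)) 0 = [] := by rw [hU1, hU, h1.1]; rfl
        have hN1 : N1 t (i+1) = i + 1 := by rw [N1_nil t (i+1) hU', if_pos h1.2]
        have hNEW2 : NEW2 t (i+1) = t.take (i+1) := by rw [NEW2, if_pos hU', if_pos h1.2]
        have hslice : PySem.List.slice t (some 0) (some ((i : Int) + 1)) = t.take (i+1) := by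
          rw [hcast, PySem.List.slice_zero_start, PySem.List.slice_to_natCast]
        rw [hslice, hN1, hNEW2]
        have hz : NEW2 t i = [] := by rw [NEW2, if_pos hU, hgetD, if_neg (by simp [h1.1])]
        rw [hz]; simp
      · rw [if_neg hU, if_neg (by simp)]
        have hU' : ups (t.take (i+1)) 0 = ups (t.take i) 0 := by rw [hU1, h1.1]; simp
        refine ⟨false, ?_, fun h => absurd (hU'.symm.trans h) hU⟩
        obtain ⟨k, hk⟩ : ∃ k, (ups (t.take i) 0).getLast? = some k :=
          ⟨_, List.getLast?_eq_some_getLast hU⟩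
        have hN1 : N1 t (i+1) = N1 t i := by
          rw [N1_last t (i+1) k (by rw [hU']; exact hk), N1_last t i k hk]
        have hNEW2 : NEW2 t (i+1) = NEW2 t i := by
          rw [NEW2, NEW2, hU', if_neg hU, if_neg hU]
        rw [hN1, hNEW2]
    · rw [if_neg h1]
      by_cases h2 : PySem.Chars.isupper t[i] = true
      · rw [if_pos h2]
        have hU' : ups (t.take (i+1)) 0 = ups (t.take i) 0 ++ [i] := by simp [hU1, h2]
        refine ⟨b, ?_, fun h => by simp [hU'] at h⟩
        have hslice : PySem.List.slice t (some ((N1 t i : Nat) : Int)) (some ((i:Nat) : Int))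
            = (t.drop (N1 t i)).take (i - N1 t i) := by rw [PySem.List.slice_natCast]
        by_cases hU : ups (t.take i) 0 = []
        · have hN1i : N1 t i = i := by rw [N1_nil t i hU, hgetD, if_pos h2]
          have hNEW2i : NEW2 t i = t.take i := by rw [NEW2, if_pos hU, hgetD, if_pos h2]
          have hN1' : N1 t (i+1) = i := by
            rw [N1_last t (i+1) i (by rw [hU', hU]; rfl)]
          have hNEW2' : NEW2 t (i+1) = t.take i := by
            rw [NEW2, if_neg (by simp [hU']), hU', hU]; simp [segs]
          rw [hslice, hN1i, hNEW2i, hN1', hNEW2']; simp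
        · have hN1i : N1 t i = (ups (t.take i) 0).getLast hU := by
            rw [N1_last t i _ (List.getLast?_eq_some_getLast hU)]
          have hNEW2i : NEW2 t i = segs t (ups (t.take i) 0) := by rw [NEW2, if_neg hU]
          have hN1' : N1 t (i+1) = i := by
            rw [N1_last t (i+1) i (by rw [hU']; exact List.getLast?_concat)]
          have hNEW2' : NEW2 t (i+1)
              = segs t (ups (t.take i) 0) ++ ((t.drop (N1 t i)).take (i - N1 t i)).reverse := by
            rw [NEW2, if_neg (by simp [hU']), hU', segs_append t _ hU, hN1i]
          rw [hslice, hN1', hNEW2', hNEW2i]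
      · rw [if_neg h2]
        have hup : PySem.Chars.isupper t[i] = false := by simpa using h2
        have hup1 : PySem.Chars.isupper (t.getD (i+1) ' ') = false := by
          by_contra hcon
          exact h1 ⟨hup, by simpa using hcon⟩
        have hU' : ups (t.take (i+1)) 0 = ups (t.take i) 0 := by rw [hU1, hup]; simp
        refine ⟨b, ?_, fun h => hb (hU'.symm.trans h)⟩
        have hN1 : N1 t (i+1) = N1 t i := by
          rw [N1, N1, hU']
          cases hl : (ups (t.take i) 0).getLast? with
          | some k => rfl
          | none => rw [hup1, hgetD, hup]; rfl
        have hNEW2 : NEW2 t (i+1) = NEW2 t i := by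
          rw [NEW2, NEW2, hU']
          by_cases hU : ups (t.take i) 0 = []
          · rw [if_pos hU, if_pos hU, hup1, hgetD, hup]; rfl
          · rw [if_neg hU, if_neg hU]
        rw [hN1, hNEW2]

lemma ab_eq (s : String) : reverse_sentence_boolean s = reverse_sentence_boolean_alt s := by
  obtain ⟨b, hf, -⟩ := invA (s.toList ++ ['A']) (s.toList ++ ['A']).length le_rfl
  have hA : reverse_sentence_boolean s
      = String.ofList (NEW2 (s.toList ++ ['A']) (s.toList ++ ['A']).length) := by
    rw [reverse_sentence_boolean]; rw [hf]
  set cs := s.toList with hcs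
  set t := cs ++ ['A'] with ht
  have hupt : ups t 0 = ups cs 0 ++ [cs.length] := by
    rw [ht, ups_append]; simp [show PySem.Chars.isupper 'A' = true from rfl]
  have htt : NEW2 t t.length = segs t (ups t 0) := by
    rw [NEW2, List.take_length, hupt, if_neg (by simp)]
  have hidx : (PySem.List.enumerate cs).filterMap
      (fun p => if PySem.Chars.isupper p.2 then some p.1 else none)
      = (ups cs 0).map (fun m : Nat => (m : Int)) := by
    exact enum_bridge cs 0
  rw [hA, htt, hupt, reverse_sentence_boolean_alt, hidx]
  cases hks : ups cs 0 with
  | nil =>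
    rw [List.map_nil, List.nil_append, segs_cons]
    rw [if_pos (by decide : (List.isEmpty ([] : List Int)) = true)]
    simp only [List.zip_nil_right, List.flatMap_nil, List.append_nil]
    rw [ht, List.take_left, hcs, String.ofList_toList]
  | cons k0 rest =>
    have hk0 : k0 ≤ cs.length := by
      have := ups_mem_lt (l := cs) (k := 0) (m := k0) (by rw [hks]; exact List.mem_cons_self)
      omega
    have hmem : ∀ m ∈ rest ++ [cs.length], m ≤ cs.length := by
      intro m hm
      rcases List.mem_append.mp hm with hm | hm
      · have := ups_mem_lt (l := cs) (k := 0) (m := m)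
          (by rw [hks]; exact List.mem_cons_of_mem _ hm)
        omega
      · simp at hm; omega
    have hpairsA : (k0 :: (rest ++ [cs.length])).zip (rest ++ [cs.length])
        = (k0 :: rest).zip (rest ++ [cs.length]) := by
      rw [zip_take (k0 :: (rest ++ [cs.length])) (rest ++ [cs.length])]
      congr 1
      simp only [List.length_append, List.length_cons, List.length_nil]
      rw [List.take_cons]
      · congr 1
        rw [List.take_append_of_le_length (by omega), List.take_of_length_le (by omega)]
      · omega
    rw [List.map_cons, List.cons_append, segs_cons, hpairsA,
      if_neg (by simp), List.headD_cons, List.tail_cons]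
    have hmapzip : ((k0 : Int) :: rest.map (fun m : Nat => (m : Int))).zip
          (rest.map (fun m : Nat => (m : Int)) ++ [(cs.length : Int)])
        = ((k0 :: rest).zip (rest ++ [cs.length])).map
            (Prod.map (fun m : Nat => (m : Int)) (fun m : Nat => (m : Int))) := by
      rw [show ((k0 : Int) :: rest.map (fun m : Nat => (m : Int)))
            = (k0 :: rest).map (fun m : Nat => (m : Int)) from rfl]
      rw [show (rest.map (fun m : Nat => (m : Int)) ++ [(cs.length : Int)])
            = (rest ++ [cs.length]).map (fun m : Nat => (m : Int)) by simp]
      rw [List.zip_map]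
    rw [hmapzip, List.map_map]
    have hseg : ∀ p ∈ (k0 :: rest).zip (rest ++ [cs.length]),
        ((fun q => (PySem.List.slice cs (some q.1) (some q.2)).reverse) ∘
          Prod.map (fun m : Nat => (m : Int)) (fun m : Nat => (m : Int))) p
        = ((t.drop p.1).take (p.2 - p.1)).reverse := by
      intro p hp
      obtain ⟨hp1, hp2⟩ := List.of_mem_zip hp
      obtain ⟨p1, p2⟩ := p
      have h1 : p1 ≤ cs.length := by
        have := ups_mem_lt (l := cs) (k := 0) (m := p1) (by rw [hks]; exact hp1)
        omega
      have h2 : p2 ≤ cs.length := hmem _ hp2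
      simp only [Function.comp_apply, Prod.map]
      rw [PySem.List.slice_natCast]
      rw [ht, List.drop_append_of_le_length h1,
        List.take_append_of_le_length (by simp [List.length_drop]; omega)]
    rw [List.map_congr_left hseg]
    have hpre : t.take k0 = PySem.List.slice cs none (some (k0 : Int)) := by
      rw [PySem.List.slice_to_natCast, ht, List.take_append_of_le_length hk0]
    rw [hpre]
    simp only [List.flatMap_def, List.flatten_cons]
    rfl

-- ===== VERDICT (by name: the statement is the Claim_ definition above) =====
theorem reverse_sentence_boolean_spec : Claim_equal_reverse_sentence_boolean := by
  intro s _
  unfold Spec_reverse_sentence_boolean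
  exact ab_eq s
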